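-- pv_equiv track=rewrite | github.com/S-Christensen/cartographersStudy | backend/scoringCards.py | sentinelWood
-- ===== SOURCE A (Python) =====
-- def sentinelWood(grid):
--     count = 0
--     rows, cols = len(grid), len(grid[0])
--
--     for r in range(rows):
--         for c in range(cols):
--             if grid[r][c] == "Forest":
--                 if r == 0 or r == rows - 1 or c == 0 or c == cols - 1:
--                     count += 1
--
--     return count
-- ===== SOURCE B (Python) =====
-- def sentinelWood(grid):
--     rows, cols = len(grid), len(grid[0])
--     if cols == 0:
--         return 0
--
--     def rowCount(row):
--         n = 0
--         for c in range(cols):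
--             if row[c] == "Forest":
--                 n += 1
--         return n
--
--     count = rowCount(grid[0])
--     if rows > 1:
--         count += rowCount(grid[-1])
--     for r in range(1, rows - 1):
--         row = grid[r]
--         if row[0] == "Forest":
--             count += 1
--         if cols > 1 and row[cols - 1] == "Forest":
--             count += 1
--     return count
-- ===== Notes on version B (the rewrite author's own statement) =====
-- stated objective: alternative
-- what changed: Instead of scanning the whole rows x cols grid and testing each cell for being on the border, B only visits border cells: it counts Forest in the top row, the bottom row (when rows>1), and checks column 0 and column cols-1 in each interior row.
import Mathlib
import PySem

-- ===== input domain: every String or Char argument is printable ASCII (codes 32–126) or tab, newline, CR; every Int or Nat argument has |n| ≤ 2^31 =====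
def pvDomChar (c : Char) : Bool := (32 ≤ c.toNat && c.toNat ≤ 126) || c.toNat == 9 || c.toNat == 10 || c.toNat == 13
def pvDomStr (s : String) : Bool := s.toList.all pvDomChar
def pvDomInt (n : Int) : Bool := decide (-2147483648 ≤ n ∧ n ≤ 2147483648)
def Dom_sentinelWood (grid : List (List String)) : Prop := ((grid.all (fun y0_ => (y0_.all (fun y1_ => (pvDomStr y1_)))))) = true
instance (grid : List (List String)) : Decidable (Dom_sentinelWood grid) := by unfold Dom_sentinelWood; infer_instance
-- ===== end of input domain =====

-- B visits only the border cells (top/bottom rows, first/last column of interior rows)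
-- instead of scanning the full grid with a border test per cell.

-- ===== PORT A =====
def sentinelWood (grid : List (List String)) : Int :=
  let rows : Int := grid.length
  let cols : Int := ((PySem.List.pyGetD grid 0 []).length : Int)
  (PySem.List.pyRange 0 rows 1).foldl (fun count r =>
    (PySem.List.pyRange 0 cols 1).foldl (fun count c =>
      if PySem.List.pyGetD (PySem.List.pyGetD grid r []) c "" == "Forest" then
        if r == 0 || r == rows - 1 || c == 0 || c == cols - 1 then count + 1 else count
      else count) count) 0

-- ===== PORT B =====
def rowCountF (cols : Int) (row : List String) : Int :=
  (PySem.List.pyRange 0 cols 1).foldl (fun n c =>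
    if PySem.List.pyGetD row c "" == "Forest" then n + 1 else n) 0

def sentinelWood_alt (grid : List (List String)) : Int :=
  let rows : Int := grid.length
  let cols : Int := ((PySem.List.pyGetD grid 0 []).length : Int)
  if cols = 0 then 0
  else
    let count := rowCountF cols (PySem.List.pyGetD grid 0 [])
    let count := if rows > 1 then count + rowCountF cols (PySem.List.pyGetD grid (-1) []) else count
    (PySem.List.pyRange 1 (rows - 1) 1).foldl (fun count r =>
      let row := PySem.List.pyGetD grid r []
      let count := if PySem.List.pyGetD row 0 "" == "Forest" then count + 1 else count
      if cols > 1 && (PySem.List.pyGetD row (cols - 1) "" == "Forest") then count + 1 else count) count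

-- ===== PRECONDITION & SPEC =====
-- Pre_ excludes exactly the inputs on which Python A raises IndexError: the empty
-- grid (len(grid[0])), and ragged grids with some row shorter than len(grid[0])
-- (grid[r][c] is evaluated for every c in range(cols) in every row).
def Pre_sentinelWood (grid : List (List String)) : Prop :=
  grid ≠ [] ∧ ∀ row ∈ grid, (PySem.List.pyGetD grid 0 []).length ≤ row.length
instance (grid : List (List String)) : Decidable (Pre_sentinelWood grid) := by
  unfold Pre_sentinelWood; infer_instance

def pvWitness_sentinelWood : List (List String) :=
  [["Forest", "Water"], ["Forest", "Forest"], ["Water", "Forest"]]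

def Spec_sentinelWood (grid : List (List String)) (out : Int) : Prop := out = sentinelWood_alt grid
instance (grid : List (List String)) (out : Int) : Decidable (Spec_sentinelWood grid out) := by
  unfold Spec_sentinelWood; infer_instance

-- ===== CLAIM (what is proved, stated in full; the proofs are below) =====
def Claim_equal_sentinelWood : Prop := ∀ (grid : List (List String)), Dom_sentinelWood grid → Pre_sentinelWood grid → Spec_sentinelWood grid (sentinelWood grid)

-- ===== LEMMAS AND PROOFS =====

-- Forest test on one cell
def pvF (row : List String) (c : Int) : Bool := PySem.List.pyGetD row c "" == "Forest"

-- interior-row contribution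
def pvG (grid : List (List String)) (cols : Int) (r : Int) : Int :=
  (if pvF (PySem.List.pyGetD grid r []) 0 then (1 : Int) else 0) +
  (if cols > 1 && pvF (PySem.List.pyGetD grid r []) (cols - 1) then (1 : Int) else 0)

-- rowCountF is a countP over the column range
theorem rowCountF_eq (cols : Int) (row : List String) :
    rowCountF cols row = ((PySem.List.pyRange 0 cols 1).countP (fun c => pvF row c) : Int) := by
  unfold rowCountF
  rw [PySem.List.foldl_if_add_one]
  simp [pvF]

-- A's inner loop on a border row (r = 0 or r = rows-1) counts every Forest cell
theorem innerA_border (grid : List (List String)) (cols rows r count : Int)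
    (h : r = 0 ∨ r = rows - 1) :
    (PySem.List.pyRange 0 cols 1).foldl (fun count c =>
      if PySem.List.pyGetD (PySem.List.pyGetD grid r []) c "" == "Forest" then
        if r == 0 || r == rows - 1 || c == 0 || c == cols - 1 then count + 1 else count
      else count) count
    = count + rowCountF cols (PySem.List.pyGetD grid r []) := by
  rw [PySem.List.foldl_congr_mem
      (g := fun count c =>
        if PySem.List.pyGetD (PySem.List.pyGetD grid r []) c "" == "Forest" then count + 1 else count)]
  · rw [PySem.List.foldl_if_add_one, rowCountF_eq]
    simp [pvF]
  · intro acc c _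
    rcases h with h | h <;> simp [h]

-- A's inner loop on an interior row adds exactly the two edge-cell contributions
theorem innerA_interior (grid : List (List String)) (cols rows r count : Int)
    (h0 : 0 < r) (h1 : r < rows - 1) (hc : 0 < cols) :
    (PySem.List.pyRange 0 cols 1).foldl (fun count c =>
      if PySem.List.pyGetD (PySem.List.pyGetD grid r []) c "" == "Forest" then
        if r == 0 || r == rows - 1 || c == 0 || c == cols - 1 then count + 1 else count
      else count) count
    = count + pvG grid cols r := by
  have hb0 : (r == (0:Int)) = false := by simp; omega
  have hbl : (r == rows - 1) = false := by simp; omega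
  rw [PySem.List.foldl_congr_mem
      (g := fun count c =>
        if (PySem.List.pyGetD (PySem.List.pyGetD grid r []) c "" == "Forest") && (c == 0 || c == cols - 1)
        then count + 1 else count)]
  · rw [PySem.List.foldl_if_add_one]
    rcases eq_or_lt_of_le (by omega : (1:Int) ≤ cols) with hc1 | hc2
    · -- cols = 1 : the range is [0]
      rw [← hc1, show PySem.List.pyRange 0 1 1 = [(0:Int)] from PySem.List.pyRange_one_singleton 0]
      simp only [List.countP_cons, List.countP_nil, pvG, pvF]
      norm_num
    · -- cols ≥ 2 : split the range as [0] ++ middle ++ [cols-1]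
      have hsplit : PySem.List.pyRange 0 cols 1
          = (0:Int) :: (PySem.List.pyRange 1 (cols - 1) 1 ++ [cols - 1]) := by
        rw [PySem.List.pyRange_one_cons (by omega)]
        rw [show cols = (cols - 1) + 1 by omega, PySem.List.pyRange_one_succ_right (by omega)]
        simp
      rw [hsplit]
      simp only [List.countP_cons, List.countP_append]
      have hmid : (PySem.List.pyRange 1 (cols - 1) 1).countP
          (fun c => (PySem.List.pyGetD (PySem.List.pyGetD grid r []) c "" == "Forest") && (c == 0 || c == cols - 1)) = 0 := by
        rw [List.countP_eq_zero]
        intro c hcm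
        rw [PySem.List.mem_pyRange_one] at hcm
        have h1 : (c == (0:Int)) = false := by simp; omega
        have h2 : (c == cols - 1) = false := by simp; omega
        simp [h1, h2]
      rw [hmid]
      have hne : ((0:Int) == cols - 1) = false := by simp; omega
      have hgt : cols > 1 := by omega
      simp only [pvG, pvF, hne, hgt]
      norm_num
      split_ifs <;> omega
  · intro acc c _
    simp only [hb0, hbl, Bool.false_or]
    cases hF : (PySem.List.pyGetD (PySem.List.pyGetD grid r []) c "" == "Forest") <;> simp

-- B's interior-row body adds the same contribution
theorem innerB_body (grid : List (List String)) (cols r count : Int) :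
    (let row := PySem.List.pyGetD grid r []
     let count := if PySem.List.pyGetD row 0 "" == "Forest" then count + 1 else count
     if cols > 1 && (PySem.List.pyGetD row (cols - 1) "" == "Forest") then count + 1 else count)
    = count + pvG grid cols r := by
  simp only [pvG, pvF]
  split_ifs <;> simp_all <;> omega

-- two folds that both add a per-element contribution agree if their starts agree
theorem foldl_eq_of_add (l : List Int) (f₁ f₂ : Int → Int → Int) (g : Int → Int)
    (h₁ : ∀ acc r, r ∈ l → f₁ acc r = acc + g r) (h₂ : ∀ acc r, r ∈ l → f₂ acc r = acc + g r)
    (i₁ i₂ d : Int) (hi : i₁ + d = i₂) : l.foldl f₁ i₁ + d = l.foldl f₂ i₂ := by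
  induction l generalizing i₁ i₂ with
  | nil => simpa using hi
  | cons x t ih =>
    simp only [List.foldl_cons]
    refine ih (fun acc r hr => h₁ acc r (List.mem_cons_of_mem x hr))
      (fun acc r hr => h₂ acc r (List.mem_cons_of_mem x hr)) _ _ ?_
    rw [h₁ _ _ (List.mem_cons_self), h₂ _ _ (List.mem_cons_self)]
    omega

-- the last row reached by index rows-1 is the row reached by index -1
theorem last_row_eq (grid : List (List String)) (h : grid ≠ []) :
    PySem.List.pyGetD grid ((grid.length : Int) - 1) [] = PySem.List.pyGetD grid (-1) [] := by
  have hl : 0 < grid.length := List.length_pos_iff.mpr h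
  have h1 : ((grid.length : Int) - 1) = ((grid.length - 1 : Nat) : Int) := by omega
  rw [h1, PySem.List.pyGetD_natCast]
  rw [PySem.List.pyGetD_neg_ofNat grid 1 [] (by omega) (by omega)]
  exact List.getD_eq_getElem _ _ (by omega)

-- ===== VERDICT (by name: the statement is the Claim_ definition above) =====
theorem sentinelWood_spec : Claim_equal_sentinelWood := by
  intro grid _ hpre
  obtain ⟨hne, -⟩ := hpre
  have hlp : 0 < grid.length := List.length_pos_iff.mpr hne
  unfold Spec_sentinelWood sentinelWood sentinelWood_alt
  simp only []
  by_cases hc0 : ((PySem.List.pyGetD grid 0 []).length : Int) = 0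
  · -- no columns: both sides are 0
    simp [hc0, PySem.List.pyRange_one_eq_nil (le_refl (0 : Int))]
  · have hc : 0 < ((PySem.List.pyGetD grid 0 []).length : Int) := by omega
    rw [if_neg hc0]
    by_cases hr1 : grid.length = 1
    · -- single row
      have hng : ¬ ((grid.length : Int) > 1) := by omega
      rw [if_neg hng]
      rw [PySem.List.pyRange_one_eq_nil (show (grid.length : Int) - 1 ≤ 1 by omega)]
      rw [show PySem.List.pyRange 0 (grid.length : Int) 1 = [(0:Int)] from by
        rw [show ((grid.length : Int)) = (0:Int) + 1 by omega]
        exact PySem.List.pyRange_one_singleton 0]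
      simp only [List.foldl_cons, List.foldl_nil]
      rw [innerA_border grid _ (grid.length : Int) 0 0 (Or.inl rfl)]
      ring
    · -- at least two rows
      have hr2 : 2 ≤ grid.length := by omega
      have hR : (2:Int) ≤ (grid.length : Int) := by exact_mod_cast hr2
      have hgt1 : ((grid.length : Int) > 1) := by omega
      rw [if_pos hgt1]
      have hsplit : PySem.List.pyRange 0 (grid.length : Int) 1
          = (0:Int) :: (PySem.List.pyRange 1 ((grid.length : Int) - 1) 1 ++ [(grid.length : Int) - 1]) := by
        rw [PySem.List.pyRange_one_cons (by omega)]
        rw [show ((grid.length : Int)) = ((grid.length : Int) - 1) + 1 by omega,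
            PySem.List.pyRange_one_succ_right (by omega)]
        simp
      rw [hsplit]
      simp only [List.foldl_cons, List.foldl_append, List.foldl_nil]
      rw [innerA_border grid _ (grid.length : Int) 0 0 (Or.inl rfl)]
      rw [innerA_border grid _ (grid.length : Int) ((grid.length : Int) - 1) _ (Or.inr rfl)]
      apply foldl_eq_of_add _ _ _ (pvG grid ((PySem.List.pyGetD grid 0 []).length : Int))
      · intro acc r hr
        rw [PySem.List.mem_pyRange_one] at hr
        exact innerA_interior grid _ (grid.length : Int) r acc (by omega) (by omega) hc
      · intro acc r _
        exact innerB_body grid _ r acc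
      · rw [last_row_eq grid hne]
        ring
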